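-- pv_equiv track=rewrite | github.com/jetkan-yk/phyting | cp4/cs/squaredeal.py | generate
-- ===== SOURCE A (Python) =====
-- def generate(h, w):
--     ret = []
--     for mask in range((1 << 3)):
--         newH = h.copy()
--         newW = w.copy()
--         for j in range(3):
--             # If j-th bit is on, swap its h and w values
--             if mask & (1 << j):
--                 newH[j], newW[j] = newW[j], newH[j]
--         ret.append((newH, newW))
--     return ret
-- ===== SOURCE B (Python) =====
-- def generate(h, w):
--     def helper(i, curH, curW):
--         # i < 0: leaf; otherwise branch at index i: keep first, then swap
--         if i < 0:
--             return [(curH, curW)]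
--         sH = curH.copy()
--         sW = curW.copy()
--         sH[i], sW[i] = curW[i], curH[i]
--         return helper(i - 1, curH, curW) + helper(i - 1, sH, sW)
--     return helper(2, h.copy(), w.copy())
-- ===== Notes on version B (the rewrite author's own statement) =====
-- stated objective: alternative
-- what changed: Replaced the mask-0..7 loop with an inner bit-test loop by a recursive helper that branches keep/swap at each of the three indices (index 2 outermost), concatenating leaf results in the same order.
import Mathlib
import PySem

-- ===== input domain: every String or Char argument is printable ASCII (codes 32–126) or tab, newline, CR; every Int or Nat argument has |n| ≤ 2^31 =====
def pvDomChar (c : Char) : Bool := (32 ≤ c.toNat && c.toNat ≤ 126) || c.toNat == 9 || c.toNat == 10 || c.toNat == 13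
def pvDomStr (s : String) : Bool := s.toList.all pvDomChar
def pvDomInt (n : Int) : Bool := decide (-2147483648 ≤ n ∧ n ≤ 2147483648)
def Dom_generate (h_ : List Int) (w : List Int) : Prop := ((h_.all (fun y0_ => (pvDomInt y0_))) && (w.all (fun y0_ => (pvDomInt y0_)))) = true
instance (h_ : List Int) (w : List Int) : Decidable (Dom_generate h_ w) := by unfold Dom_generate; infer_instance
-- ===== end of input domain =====

-- B replaces the mask 0..7 loop by a recursion branching keep/swap at each of the three
-- indices (index 2 outermost), a different decomposition of the same enumeration.

-- ===== PORT A =====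
-- mask loop 0..7; inner loop j = 0..2 swaps position j when bit j of mask is set.
-- Index accesses are valid under Pre_ (both lists have length ≥ 3), where getD/set are exact.
def generate (h_ : List Int) (w : List Int) : List (List Int × List Int) :=
  (PySem.List.pyRange 0 8 1).foldl (fun ret mask =>
    let p := (List.range 3).foldl (fun (hw : List Int × List Int) j =>
        if mask.land (Int.ofNat (1 <<< j)) ≠ 0 then
          (hw.1.set j (hw.2.getD j 0), hw.2.set j (hw.1.getD j 0))
        else hw) (h_, w)
    ret ++ [p]) []

-- ===== PORT B =====
-- Source B's helper(i, curH, curW): here the Nat fuel n stands for i+1 (n = 0 is the i < 0 leaf).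
def genHelper : Nat → List Int → List Int → List (List Int × List Int)
  | 0, curH, curW => [(curH, curW)]
  | (i+1), curH, curW =>
      let sH := curH.set i (curW.getD i 0)
      let sW := curW.set i (curH.getD i 0)
      genHelper i curH curW ++ genHelper i sH sW

def generate_alt (h_ : List Int) (w : List Int) : List (List Int × List Int) :=
  genHelper 3 h_ w

-- ===== PRECONDITION & SPEC =====
-- Pre_ excludes exactly the inputs where A raises IndexError: a list shorter than 3.
def Pre_generate (h_ : List Int) (w : List Int) : Prop := 3 ≤ h_.length ∧ 3 ≤ w.length
instance (h_ : List Int) (w : List Int) : Decidable (Pre_generate h_ w) := by unfold Pre_generate; infer_instance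
def pvWitness_generate : List Int × List Int := ([1, 2, 3], [4, 5, 6])

def Spec_generate (h_ : List Int) (w : List Int) (out : List (List Int × List Int)) : Prop := out = generate_alt h_ w
instance (h_ : List Int) (w : List Int) (out : List (List Int × List Int)) : Decidable (Spec_generate h_ w out) := by unfold Spec_generate; infer_instance

-- ===== CLAIM (what is proved, stated in full; the proofs are below) =====
def Claim_equal_generate : Prop := ∀ (h_ : List Int) (w : List Int), Dom_generate h_ w → Pre_generate h_ w → Spec_generate h_ w (generate h_ w)

-- ===== LEMMAS AND PROOFS =====

-- ===== VERDICT (by name: the statement is the Claim_ definition above) =====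
theorem generate_spec : Claim_equal_generate := by
  intro h_ w _ hpre
  obtain ⟨hh, hw⟩ := hpre
  match h_, w with
  | a :: b :: c :: t, x :: y :: z :: u =>
    show generate _ _ = generate_alt _ _
    rfl
  | [], _ | [_], _ | [_,_], _ => simp at hh
  | _ :: _ :: _ :: _, [] | _ :: _ :: _ :: _, [_] | _ :: _ :: _ :: _, [_,_] => simp at hw
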